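-- pv_equiv track=rewrite | github.com/coderwilson/FFX_TAS_Python | tracker/ffx_rng_tracker/data/monsters.py | get_raw_data_string
-- ===== SOURCE A (Python) =====
-- def get_raw_data_string(prize_struct: list[str]) -> str:
--     string = ''
--     for index, byte in enumerate(prize_struct):
--         # every 16 bytes make a new line
--         if index % 16 == 0:
--             string += '\n'
--             string += ' '.join(
--                 [f'[{hex(index + i)[2:]:>3}]' for i in range(16)])
--             string += '\n'
--         # print the bytes' value
--         # string += f' {hex(byte)[2:]:>3}  '
--         string += f' {byte:>3}  '
--         # string += f' {byte:08b}  '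
--     return string
-- ===== SOURCE B (Python) =====
-- def get_raw_data_string(prize_struct: list[str]) -> str:
--     # Chunk-by-chunk decomposition with hand-rolled hex and rjust: peel 16-byte
--     # chunks off with an explicit index loop, build each chunk's cell row with
--     # its own accumulator, and render header addresses with an explicit
--     # digit-extraction loop instead of hex()[2:] slicing.
--     def _hx(n):
--         if n == 0:
--             return '0'
--         digits = ''
--         while n > 0:
--             digits = '0123456789abcdef'[n % 16] + digits
--             n //= 16
--         return digits
--
--     out = ''
--     i = 0
--     while i < len(prize_struct):
--         cells = ''
--         for b in prize_struct[i:i + 16]: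
--             cells += ' ' + b.rjust(3) + '  '
--         header = ' '.join('[' + _hx(i + j).rjust(3) + ']' for j in range(16))
--         out += '\n' + header + '\n' + cells
--         i += 16
--     return out
-- ===== Notes on version B (the rewrite author's own statement) =====
-- stated objective: alternative
-- what changed: B replaces A's single flat enumerate loop with an index%16 header trigger and hex()[2:] string slicing by an explicit chunked decomposition: an index loop peels 16-byte chunks, each chunk's cell row is built by its own inner accumulator loop, and header addresses are rendered by a hand-rolled digit-extraction hex loop with str.rjust padding.
import Mathlib
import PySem

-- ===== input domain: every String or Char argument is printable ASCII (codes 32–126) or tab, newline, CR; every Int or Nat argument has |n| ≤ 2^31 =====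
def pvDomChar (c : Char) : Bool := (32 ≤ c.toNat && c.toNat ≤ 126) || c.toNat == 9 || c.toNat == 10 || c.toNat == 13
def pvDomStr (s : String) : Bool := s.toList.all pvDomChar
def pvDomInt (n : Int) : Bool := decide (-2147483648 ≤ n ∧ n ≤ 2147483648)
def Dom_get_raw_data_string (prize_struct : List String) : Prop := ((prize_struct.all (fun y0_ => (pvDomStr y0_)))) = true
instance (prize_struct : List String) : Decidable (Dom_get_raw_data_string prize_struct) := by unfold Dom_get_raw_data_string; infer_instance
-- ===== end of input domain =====

-- B replaces A's flat loop with an index%16 header trigger and hex()[2:] by an explicit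
-- chunked index loop with its own inner cell loop and a hand-rolled hex routine
-- (objective: alternative; same output, same cost).

-- ===== PORT A =====
-- {x:>3}: right-justify in width 3 with spaces
def rjust3 (s : List Char) : List Char := List.replicate (3 - s.length) ' ' ++ s

def hexDigit (n : Nat) : Char := if n < 10 then Char.ofNat (48 + n) else Char.ofNat (87 + n)

-- hex(n)[2:] for a nonnegative int: lowercase hex digits, exact for n ≥ 0 (all indices here are ≥ 0)
def hexNat (n : Nat) : List Char :=
  if _h : n < 16 then [hexDigit n]
  else hexNat (n / 16) ++ [hexDigit (n % 16)]
decreasing_by exact Nat.div_lt_self (by omega) (by omega)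

-- ' '.join([f'[{hex(index + i)[2:]:>3}]' for i in range(16)]); index ≥ 0 throughout, so .toNat is exact
def headerLine (index : Int) : List Char :=
  PySem.Chars.join [' ']
    ((List.range 16).map (fun i => '[' :: (rjust3 (hexNat (index + (i : Int)).toNat) ++ [']'])))

-- f' {byte:>3}  '
def fmtByte (byte : String) : List Char := ' ' :: (rjust3 byte.toList ++ [' ', ' '])

-- flat loop over enumerate(prize_struct); string += … in the Python order
def get_raw_data_string (prize_struct : List String) : String :=
  String.ofList
    ((PySem.List.enumerate prize_struct).foldl
      (fun acc p =>
        let acc := if PySem.Int.mod p.1 16 == 0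
          then acc ++ ('\n' :: headerLine p.1) ++ ['\n'] else acc
        acc ++ fmtByte p.2) [])

-- ===== PORT B =====
-- the while loop of _hx: digits = '0123456789abcdef'[n % 16] + digits; n //= 16
-- (the index n % 16 is always in range, so .getD ' ' is never taken)
def hxLoop (n : Nat) (digits : List Char) : List Char :=
  if h : 0 < n then
    hxLoop (n / 16)
      (((PySem.Str.pyGet? "0123456789abcdef" ((n % 16 : Nat) : Int)).getD ' ') :: digits)
  else digits
termination_by n
decreasing_by exact Nat.div_lt_self h (by omega)

-- _hx(n); n is a Python int that is always ≥ 0 here, so Nat is exact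
def hxB (n : Nat) : List Char := if n = 0 then ['0'] else hxLoop n []

-- s.rjust(3)
def rjustB (s : List Char) : List Char :=
  if s.length < 3 then List.replicate (3 - s.length) ' ' ++ s else s

-- ' ' + b.rjust(3) + '  '
def cellB (b : String) : List Char := [' '] ++ rjustB b.toList ++ [' ', ' ']

-- ' '.join('[' + _hx(i + j).rjust(3) + ']' for j in range(16)), join as intersperse+flatten
def headB (i : Nat) : List Char :=
  (List.intersperse [' ']
    ((List.range 16).map (fun j => ['['] ++ rjustB (hxB (i + j)) ++ [']']))).flatten

-- while i < len(prize_struct): inner cells accumulator over the slice, then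
-- out += '\n' + header + '\n' + cells; i += 16.  i only holds 0,16,32,…, so Nat is exact.
def altGo (full : List String) (i : Nat) : List Char :=
  if i < full.length then
    ('\n' :: headB i) ++ '\n' ::
      ((PySem.List.slice full (some (i : Int)) (some ((i : Int) + 16))).foldl
        (fun acc b => acc ++ cellB b) [])
      ++ altGo full (i + 16)
  else []
termination_by full.length - i
decreasing_by omega

def get_raw_data_string_alt (prize_struct : List String) : String :=
  String.ofList (altGo prize_struct 0)

-- ===== PRECONDITION & SPEC =====
def Spec_get_raw_data_string (prize_struct : List String) (out : String) : Prop := out = get_raw_data_string_alt prize_struct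
instance (prize_struct : List String) (out : String) : Decidable (Spec_get_raw_data_string prize_struct out) := by unfold Spec_get_raw_data_string; infer_instance

-- ===== CLAIM (what is proved, stated in full; the proofs are below) =====
def Claim_equal_get_raw_data_string : Prop := ∀ (prize_struct : List String), Dom_get_raw_data_string prize_struct → Spec_get_raw_data_string prize_struct (get_raw_data_string prize_struct)

-- ===== LEMMAS AND PROOFS =====

-- B's formatting pieces coincide with A's
theorem rjustB_eq (s : List Char) : rjustB s = rjust3 s := by
  unfold rjustB rjust3
  split_ifs with h
  · rfl
  · have : 3 - s.length = 0 := by omega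
    simp [this]

theorem cellB_eq (b : String) : cellB b = fmtByte b := by
  simp [cellB, fmtByte, rjustB_eq]

theorem hxLoop_eq (fuel : Nat) (n : Nat) (ds : List Char) (h0 : 0 < n) (hf : n ≤ fuel) :
    hxLoop n ds = hexNat n ++ ds := by
  induction fuel generalizing n ds with
  | zero => omega
  | succ fuel ih =>
      rw [hxLoop]
      simp only [h0, dif_pos]
      have hd : ∀ d : Nat, d < 16 →
          ((PySem.Str.pyGet? "0123456789abcdef" ((d : Nat) : Int)).getD ' ') = hexDigit d := by
        intro d hd; interval_cases d <;> decide
      have hdig := hd (n % 16) (Nat.mod_lt _ (by omega))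
      by_cases hn : n < 16
      · have : n / 16 = 0 := Nat.div_eq_of_lt hn
        rw [this, hxLoop]
        simp only [Nat.lt_irrefl]
        rw [hexNat]
        simp only [hn, dif_pos]
        have : n % 16 = n := Nat.mod_eq_of_lt hn
        rw [hdig, this]
        rfl
      · have hq : 0 < n / 16 := Nat.div_pos (by omega) (by omega)
        rw [ih (n / 16) _ hq (by omega), hdig]
        conv_rhs => rw [hexNat]
        simp [hn]
  
theorem hxB_eq (n : Nat) : hxB n = hexNat n := by
  unfold hxB
  by_cases h : n = 0
  · subst h; rw [hexNat]; simp; decide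
  · rw [if_neg h]
    simpa using hxLoop_eq n n [] (by omega) le_rfl

theorem join_eq_intersperse (xs : List (List Char)) :
    PySem.Chars.join [' '] xs = (List.intersperse [' '] xs).flatten := by
  induction xs with
  | nil => simp [PySem.Chars.join_nil]
  | cons x tail ih =>
      cases tail with
      | nil => simp [PySem.Chars.join_singleton]
      | cons y t =>
          rw [PySem.Chars.join_cons_cons, ih]
          simp

theorem headB_eq (i : Nat) : headB i = headerLine (i : Int) := by
  unfold headB headerLine
  rw [join_eq_intersperse]
  congr 2
  rw [show (List.range 16 >>= fun (a : Nat) => pure ((a : Int)))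
        = (List.range 16).map (fun (a : Nat) => (a : Int)) from by simp [List.map_eq_flatMap], List.map_map]
  apply List.map_congr_left
  intro j hj
  simp only [Function.comp]
  have : ((i : Int) + (j : Int)).toNat = i + j := by omega
  rw [this, rjustB_eq, hxB_eq]
  rfl

theorem cells_foldl (xs : List String) (acc : List Char) :
    xs.foldl (fun acc b => acc ++ cellB b) acc = acc ++ (xs.map fmtByte).flatten := by
  induction xs generalizing acc with
  | nil => simp
  | cons x rest ih => simp [cellB_eq]

-- A's loop body as a recursion on the list with an explicit running index
def bodyA (b : Int) (xs : List String) : List Char :=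
  match xs with
  | [] => []
  | x :: rest =>
      (if PySem.Int.mod b 16 == 0 then ('\n' :: headerLine b) ++ ['\n'] else [])
        ++ fmtByte x ++ bodyA (b + 1) rest

theorem foldlA_eq_bodyA (xs : List String) (b : Int) (acc : List Char) :
    (PySem.List.enumerate xs b).foldl
      (fun acc p =>
        let acc := if PySem.Int.mod p.1 16 == 0
          then acc ++ ('\n' :: headerLine p.1) ++ ['\n'] else acc
        acc ++ fmtByte p.2) acc = acc ++ bodyA b xs := by
  induction xs generalizing b acc with
  | nil => simp [PySem.List.enumerate_nil, bodyA]
  | cons x rest ih =>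
      rw [PySem.List.enumerate_cons]
      simp only [List.foldl_cons, ih, bodyA]
      by_cases h : (16 : Int) ∣ b <;> simp [h]

theorem bodyA_append (u v : List String) (b : Int) :
    bodyA b (u ++ v) = bodyA b u ++ bodyA (b + u.length) v := by
  induction u generalizing b with
  | nil => simp [bodyA]
  | cons x rest ih =>
      simp only [List.cons_append, bodyA, ih, List.length_cons]
      have : b + 1 + (rest.length : Int) = b + ((rest.length : Int) + 1) := by ring
      simp [this]

theorem bodyA_no_header (u : List String) (b : Int)
    (h : ∀ j : Nat, j < u.length → (PySem.Int.mod (b + j) 16 == 0) = false) :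
    bodyA b u = (u.map fmtByte).flatten := by
  induction u generalizing b with
  | nil => simp [bodyA]
  | cons x rest ih =>
      have h0 : (PySem.Int.mod b 16 == 0) = false := by
        have := h 0 (by simp)
        simpa using this
      simp only [bodyA, h0, List.map_cons, List.flatten_cons]
      rw [ih]
      · simp
      · intro j hj
        have := h (j + 1) (by simpa using Nat.succ_lt_succ hj)
        have e : b + ((j : Int) + 1) = b + 1 + (j : Int) := by ring
        rw [← e]
        simpa [Int.add_assoc] using this

theorem mod16_ne (b : Int) (k : Nat) (hb : (16 : Int) ∣ b) (hk1 : 1 ≤ k) (hk : k ≤ 15) :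
    (PySem.Int.mod (b + k) 16 == 0) = false := by
  rw [beq_eq_false_iff_ne]
  intro hc
  have h := (PySem.Int.mod_eq_zero_iff_dvd (b + k) 16).mp hc
  obtain ⟨m, hm⟩ := hb
  obtain ⟨m', hm'⟩ := h
  omega

theorem altGo_stop (full : List String) (i : Nat) (h : ¬ i < full.length) :
    altGo full i = [] := by
  rw [altGo.eq_def]; simp [h]

theorem altGo_step (full : List String) (i : Nat) (h : i < full.length) :
    altGo full i =
      (('\n' :: headerLine (i : Int)) ++ ['\n'])
        ++ ((PySem.List.slice full (some (i : Int)) (some ((i : Int) + 16))).map fmtByte).flatten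
        ++ altGo full (i + 16) := by
  rw [altGo.eq_def]
  simp only [h, if_pos, headB_eq, cells_foldl, List.nil_append]
  simp

theorem bodyA_eq_altGo (n : Nat) (full : List String) (i : Nat)
    (hn : full.length - i ≤ n) (hb : 16 ∣ i) :
    bodyA (i : Int) (full.drop i) = altGo full i := by
  induction n generalizing i with
  | zero =>
      have hge : full.length ≤ i := by omega
      rw [List.drop_eq_nil_of_le hge, altGo_stop full i (by omega)]
      simp [bodyA]
  | succ n ih =>
      by_cases h : i < full.length
      · cases hD : full.drop i with
        | nil =>
            exfalso
            have := List.length_drop (l := full) (i := i)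
            rw [hD] at this
            simp at this
            omega
        | cons x rest =>
            have hslice : PySem.List.slice full (some (i : Int)) (some ((i : Int) + 16))
                = x :: rest.take 15 := by
              have e : ((i : Int) + 16) = ((i : Int) + ((16 : Nat) : Int)) := by push_cast; ring
              rw [e, PySem.List.slice_natCast_add, hD]
              simp
            have hdrop16 : full.drop (i + 16) = rest.drop 15 := by
              have h1 : full.drop (i + 16) = (full.drop i).drop 16 := by
                rw [List.drop_drop]
              rw [h1, hD]
              simp
            have hdvd : (16 : Int) ∣ (i : Int) := by
              obtain ⟨m, hm⟩ := hb; exact ⟨(m : Int), by push_cast [hm]; ring⟩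
            have htk : ∀ j : Nat, j < (rest.take 15).length →
                (PySem.Int.mod ((i : Int) + 1 + j) 16 == 0) = false := by
              intro j hj
              have hj15 : j < 15 := lt_of_lt_of_le hj (by simp [List.length_take])
              have e : (i : Int) + 1 + (j : Int) = (i : Int) + ((j + 1 : Nat) : Int) := by
                push_cast; ring
              rw [e]
              exact mod16_ne (i : Int) (j + 1) hdvd (by omega) (by omega)
            have hflat : bodyA ((i : Int) + 1) (rest.take 15)
                = ((rest.take 15).map fmtByte).flatten := bodyA_no_header _ _ htk
            have hrest : rest = rest.take 15 ++ rest.drop 15 := (List.take_append_drop 15 rest).symm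
            have hlenrest : rest.length = full.length - i - 1 := by
              have := List.length_drop (l := full) (i := i)
              rw [hD] at this
              simp at this
              omega
            have hih : bodyA ((i + 16 : Nat) : Int) (full.drop (i + 16)) = altGo full (i + 16) :=
              ih (i + 16) (by omega) (by omega)
            rw [altGo_step full i h, hslice, ← hih, hdrop16]
            conv_lhs => rw [bodyA, hrest, bodyA_append]
            have hb0 : (16 : Int) ∣ (i : Int) := hdvd
            rcases Nat.le_total 15 rest.length with hge15 | hlt15
            · have hlen15 : (rest.take 15).length = 15 := by simp [List.length_take]; omega
              have e16 : (i : Int) + 1 + ((rest.take 15).length : Int) = ((i + 16 : Nat) : Int) := by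
                rw [hlen15]; push_cast; ring
              rw [hflat, e16]
              simp [hb0, List.append_assoc]
            · have hd15 : rest.drop 15 = [] := List.drop_eq_nil_of_le (by omega)
              rw [hd15, hflat]
              simp [bodyA, hb0, List.append_assoc]
      · rw [List.drop_eq_nil_of_le (by omega), altGo_stop full i h]
        simp [bodyA]

-- ===== VERDICT (by name: the statement is the Claim_ definition above) =====
theorem get_raw_data_string_spec : Claim_equal_get_raw_data_string := by
  intro ps _
  unfold Spec_get_raw_data_string get_raw_data_string get_raw_data_string_alt
  rw [foldlA_eq_bodyA]
  have := bodyA_eq_altGo ps.length ps 0 (by omega) ⟨0, rfl⟩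
  simp at this
  rw [this]
  simp
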